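-- pv_equiv track=rewrite | github.com/Heckie75/Denon-DRA-F109-Remote | denon.py | __number_to_rc_commands
-- ===== SOURCE A (Python) =====
-- def __number_to_rc_commands(no):
--
--     no = int(no)
--
--     rc_commands = []
--     while True:
--         if no >= 10:
--             rc_commands += ["num", "+10"]
--             no -= 10
--         else:
--             rc_commands += ["num", str(no)]
--             break
--
--     return rc_commands
-- ===== SOURCE B (Python) =====
-- def __number_to_rc_commands(no):
--     no = int(no)
--     q, r = divmod(no, 10) if no >= 10 else (0, no)
--     return ["num", "+10"] * q + ["num", str(r)]
-- ===== Notes on version B (the rewrite author's own statement) =====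
-- stated objective: simpler
-- what changed: Replaces the repeated-subtraction while-loop with a direct divmod computation: the number of '+10' pairs is no//10 (guarded by no>=10 so small and negative inputs emit none) and the list is built by list repetition instead of accumulation.
import Mathlib
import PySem

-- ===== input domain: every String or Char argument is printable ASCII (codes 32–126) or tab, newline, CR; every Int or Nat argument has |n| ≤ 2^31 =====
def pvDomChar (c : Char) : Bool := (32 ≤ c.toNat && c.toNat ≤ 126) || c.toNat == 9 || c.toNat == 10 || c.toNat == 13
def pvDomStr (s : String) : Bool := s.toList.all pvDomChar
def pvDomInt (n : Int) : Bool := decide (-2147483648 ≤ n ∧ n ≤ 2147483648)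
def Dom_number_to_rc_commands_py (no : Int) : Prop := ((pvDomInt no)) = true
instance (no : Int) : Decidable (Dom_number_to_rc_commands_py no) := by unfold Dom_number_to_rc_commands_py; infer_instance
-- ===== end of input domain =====

-- B replaces A's repeated-subtraction while-loop by a guarded divmod and list repetition (objective: simpler).

-- ===== PORT A =====
-- the 'while True' loop: accumulate ["num","+10"] while no >= 10, then append ["num", str(no)]
def pvALoop (no : Int) (acc : List String) : List String :=
  if 10 ≤ no then pvALoop (no - 10) (acc ++ ["num", "+10"])
  else acc ++ ["num", PySem.Int.toStr no]
termination_by no.toNat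
decreasing_by omega

def number_to_rc_commands_py (no : Int) : List String :=
  pvALoop no []

-- ===== PORT B =====
def number_to_rc_commands_py_alt (no : Int) : List String :=
  let qr : Int × Int :=
    if 10 ≤ no then (PySem.Int.floordiv no 10, PySem.Int.mod no 10) else (0, no)
  (List.replicate qr.1.toNat ["num", "+10"]).flatten ++ ["num", PySem.Int.toStr qr.2]

-- ===== PRECONDITION & SPEC =====
def Spec_number_to_rc_commands_py (no : Int) (out : List String) : Prop := out = number_to_rc_commands_py_alt no
instance (no : Int) (out : List String) : Decidable (Spec_number_to_rc_commands_py no out) := by unfold Spec_number_to_rc_commands_py; infer_instance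

-- ===== CLAIM (what is proved, stated in full; the proofs are below) =====
def Claim_equal_number_to_rc_commands_py : Prop := ∀ (no : Int), Dom_number_to_rc_commands_py no → Spec_number_to_rc_commands_py no (number_to_rc_commands_py no)

-- ===== LEMMAS AND PROOFS =====

-- one loop step of A corresponds to peeling one ["num","+10"] pair off B's repetition
lemma alt_step (no : Int) (h : 10 ≤ no) :
    number_to_rc_commands_py_alt no = ["num", "+10"] ++ number_to_rc_commands_py_alt (no - 10) := by
  unfold number_to_rc_commands_py_alt
  have h10 : (0:Int) < 10 := by norm_num
  simp only [if_pos h, PySem.Int.floordiv_eq_ediv_of_pos (a := no) h10,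
    PySem.Int.mod_eq_emod_of_pos (a := no) h10]
  by_cases h2 : 10 ≤ no - 10
  · simp only [if_pos h2, PySem.Int.floordiv_eq_ediv_of_pos (a := no - 10) (by omega),
      PySem.Int.mod_eq_emod_of_pos (a := no - 10) (by omega)]
    have hq : no / 10 = (no - 10) / 10 + 1 := by omega
    have hr : no % 10 = (no - 10) % 10 := by omega
    have ht : ((no - 10) / 10 + 1).toNat = ((no - 10) / 10).toNat + 1 := by omega
    rw [hq, hr, ht]
    simp [List.replicate_succ]
  · simp only [if_neg h2]
    have hq : no / 10 = 1 := by omega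
    have hr : no % 10 = no - 10 := by omega
    rw [hq, hr]
    simp

lemma pvALoop_eq (no : Int) (acc : List String) :
    pvALoop no acc = acc ++ number_to_rc_commands_py_alt no := by
  by_cases h : 10 ≤ no
  · rw [pvALoop, if_pos h, pvALoop_eq (no - 10), alt_step no h]
    simp
  · rw [pvALoop, if_neg h]
    unfold number_to_rc_commands_py_alt
    simp [if_neg h]
termination_by no.toNat
decreasing_by omega

-- ===== VERDICT (by name: the statement is the Claim_ definition above) =====
theorem number_to_rc_commands_py_spec : Claim_equal_number_to_rc_commands_py := by
  intro no _
  unfold Spec_number_to_rc_commands_py number_to_rc_commands_py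
  simpa using pvALoop_eq no []
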